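-- pv_equiv track=rewrite | github.com/HeyClos/DeluxeLV | trestle_etl/odata_client.py | get_quota_info
-- ===== SOURCE A (Python) =====
-- from typing import Dict, Any, Optional, List, Union
--
-- def get_quota_info(response_headers: Dict[str, str]) -> Dict[str, Any]:
--     """
--     Extract quota information from response headers.
--
--     Args:
--         response_headers: HTTP response headers.
--
--     Returns:
--         Dictionary with quota information.
--     """
--     quota_info = {}
--
--     # Common quota header names
--     quota_headers = [
--         'Minute-Quota-Limit',
--         'Minute-Quota-Remaining',
--         'Hour-Quota-Limit',
--         'Hour-Quota-Remaining',
--         'Daily-Quota-Limit',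
--         'Daily-Quota-Remaining'
--     ]
--
--     for header in quota_headers:
--         value = response_headers.get(header)
--         if value:
--             try:
--                 quota_info[header.lower().replace('-', '_')] = int(value)
--             except ValueError:
--                 quota_info[header.lower().replace('-', '_')] = value
--
--     return quota_info
-- ===== SOURCE B (Python) =====
-- # One pass over the input headers, bucketing each recognized quota header into a
-- # rank-indexed slot table, then emitting the slots in canonical order.
--
-- _ORDER = {
--     'Minute-Quota-Limit': 0,
--     'Minute-Quota-Remaining': 1,
--     'Hour-Quota-Limit': 2,
--     'Hour-Quota-Remaining': 3,
--     'Daily-Quota-Limit': 4,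
--     'Daily-Quota-Remaining': 5,
-- }
--
-- _NAMES = ('minute_quota_limit', 'minute_quota_remaining', 'hour_quota_limit',
--           'hour_quota_remaining', 'daily_quota_limit', 'daily_quota_remaining')
--
--
-- def get_quota_info(response_headers):
--     slots = [None] * 6
--     for key, value in response_headers.items():
--         rank = _ORDER.get(key)
--         if rank is not None and value:
--             try:
--                 slots[rank] = int(value)
--             except ValueError:
--                 slots[rank] = value
--     return {name: v for name, v in zip(_NAMES, slots) if v is not None}
-- ===== Notes on version B (the rewrite author's own statement) =====
-- stated objective: alternative
-- what changed: Instead of looping over the six fixed header names and calling dict.get for each, B makes one pass over the input headers, bucketing each recognized quota header (via a name->rank table) into a fixed slot array, then emits the slots in canonical order.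
import Mathlib
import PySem

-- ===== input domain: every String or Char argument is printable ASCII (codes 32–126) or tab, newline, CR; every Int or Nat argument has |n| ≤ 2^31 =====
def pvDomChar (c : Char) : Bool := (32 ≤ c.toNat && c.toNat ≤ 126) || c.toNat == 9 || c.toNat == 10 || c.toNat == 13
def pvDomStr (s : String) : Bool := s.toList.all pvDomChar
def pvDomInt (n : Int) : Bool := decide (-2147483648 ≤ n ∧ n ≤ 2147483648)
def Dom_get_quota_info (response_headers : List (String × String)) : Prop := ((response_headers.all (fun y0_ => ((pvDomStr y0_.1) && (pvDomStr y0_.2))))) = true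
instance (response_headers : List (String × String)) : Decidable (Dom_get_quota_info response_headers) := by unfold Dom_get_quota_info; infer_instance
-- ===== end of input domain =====

-- B replaces A's loop over the six fixed header names (one dict lookup each) with a single pass
-- over the input that buckets recognized quota headers into a rank-indexed slot table, emitted in
-- canonical order; alternative structure, same cost. Equivalence is about the return value.

-- ===== PORT A =====
def quotaHeadersA : List String :=
  ["Minute-Quota-Limit", "Minute-Quota-Remaining", "Hour-Quota-Limit",
   "Hour-Quota-Remaining", "Daily-Quota-Limit", "Daily-Quota-Remaining"]

-- loop body of A's 'for header in quota_headers'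
def stepA (response_headers : List (String × String)) (q : PySem.Dict String Int) (header : String) : PySem.Dict String Int :=
  match (PySem.Dict.mk response_headers).get? header with   -- response_headers.get(header)
  | some v =>
      if v ≠ "" then                                        -- if value:
        match PySem.Int.ofStr? v with                       -- int(value)
        | some n => q.insert (PySem.Str.replace (PySem.Str.lower header) "-" "_") n
        | none => q   -- ValueError branch stores the raw string (not an Int); such inputs are outside Pre_
      else q
  | none => q

def get_quota_info (response_headers : List (String × String)) : List (String × Int) :=
  (quotaHeadersA.foldl (stepA response_headers) PySem.Dict.empty).items

-- ===== PORT B =====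
def orderTable : PySem.Dict String Int :=
  PySem.Dict.mk [("Minute-Quota-Limit", 0), ("Minute-Quota-Remaining", 1), ("Hour-Quota-Limit", 2),
                 ("Hour-Quota-Remaining", 3), ("Daily-Quota-Limit", 4), ("Daily-Quota-Remaining", 5)]

def namesB : List String :=
  ["minute_quota_limit", "minute_quota_remaining", "hour_quota_limit",
   "hour_quota_remaining", "daily_quota_limit", "daily_quota_remaining"]

-- loop body of B's 'for key, value in response_headers.items()'
def stepB (slots : List (Option Int)) (kv : String × String) : List (Option Int) :=
  match orderTable.get? kv.1 with                           -- _ORDER.get(key)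
  | some rank =>
      if kv.2 ≠ "" then                                     -- rank is not None and value
        match PySem.Int.ofStr? kv.2 with                    -- int(value)
        | some n => slots.set rank.toNat (some n)           -- slots[rank] = int(value); rank is always 0..5
        | none => slots  -- ValueError branch stores the raw string (not an Int); such inputs are outside Pre_
      else slots
  | none => slots

-- body of the final dict comprehension over zip(_NAMES, slots)
def emitB (q : PySem.Dict String Int) (p : String × Option Int) : PySem.Dict String Int :=
  match p.2 with
  | some v => q.insert p.1 v
  | none => q

def get_quota_info_alt (response_headers : List (String × String)) : List (String × Int) :=
  let slots := response_headers.foldl stepB [none, none, none, none, none, none]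
  ((namesB.zip slots).foldl emitB PySem.Dict.empty).items

-- ===== PRECONDITION & SPEC =====
-- Pre_ excludes (i) association lists with duplicate keys, which a Python dict argument cannot
-- represent (the encoding is ambiguous there), and (ii) inputs where some quota header carries a
-- non-empty value that int() rejects: there Python A returns a dict holding that raw string, which
-- is not a value of the declared return type List (String × Int).
def Pre_get_quota_info (response_headers : List (String × String)) : Prop :=
  (response_headers.map Prod.fst).Nodup ∧
  (response_headers.all (fun p =>
    !(decide (p.1 ∈ ["Minute-Quota-Limit", "Minute-Quota-Remaining", "Hour-Quota-Limit",
                     "Hour-Quota-Remaining", "Daily-Quota-Limit", "Daily-Quota-Remaining"]))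
    || (p.2 == "") || (PySem.Int.ofStr? p.2).isSome)) = true

instance (response_headers : List (String × String)) : Decidable (Pre_get_quota_info response_headers) := by
  unfold Pre_get_quota_info; infer_instance

def pvWitness_get_quota_info : (List (String × String)) :=
  [("Minute-Quota-Limit", "100"), ("X-Other", "abc"), ("Hour-Quota-Remaining", "")]

def Spec_get_quota_info (response_headers : List (String × String)) (out : List (String × Int)) : Prop := out = get_quota_info_alt response_headers
instance (response_headers : List (String × String)) (out : List (String × Int)) : Decidable (Spec_get_quota_info response_headers out) := by unfold Spec_get_quota_info; infer_instance

-- ===== CLAIM (what is proved, stated in full; the proofs are below) =====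
def Claim_equal_get_quota_info : Prop := ∀ (response_headers : List (String × String)), Dom_get_quota_info response_headers → Pre_get_quota_info response_headers → Spec_get_quota_info response_headers (get_quota_info response_headers)

-- ===== LEMMAS AND PROOFS =====

-- the value A's loop body would insert for header h, if any
def pickVal (rh : List (String × String)) (h : String) : Option Int :=
  match (PySem.Dict.mk rh).get? h with
  | some v =>
      if v ≠ "" then
        match PySem.Int.ofStr? v with
        | some n => some n
        | none => none
      else none
  | none => none

theorem get?_mk_append_singleton (l : List (String × String)) (k v : String) (h : String) :
    (PySem.Dict.mk (l ++ [(k, v)])).get? h =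
      match (PySem.Dict.mk l).get? h with
      | some w => some w
      | none => if k == h then some v else none := by
  induction l with
  | nil =>
      simp only [List.nil_append, PySem.Dict.get?_mk_cons]
      cases hc : (k == h) <;> simp [PySem.Dict.get?]
  | cons x xs ih =>
      rw [List.cons_append, PySem.Dict.get?_mk_cons, PySem.Dict.get?_mk_cons]
      cases hx : (x.1 == h) <;> simp [ih]

theorem get?_mk_none_of_not_mem (l : List (String × String)) (k : String)
    (hnm : k ∉ l.map Prod.fst) : (PySem.Dict.mk l).get? k = none := by
  induction l with
  | nil => simp [PySem.Dict.get?]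
  | cons x xs ih =>
      rw [PySem.Dict.get?_mk_cons]
      simp only [List.map_cons, List.mem_cons, not_or] at hnm
      have hx : (x.1 == k) = false := by
        simp only [beq_eq_false_iff_ne]; exact fun hEq => hnm.1 hEq.symm
      simp only [hx, Bool.false_eq_true, if_false]
      exact ih hnm.2

theorem pickVal_none_of_not_mem (l : List (String × String)) (k : String)
    (hnm : k ∉ l.map Prod.fst) : pickVal l k = none := by
  unfold pickVal
  rw [get?_mk_none_of_not_mem l k hnm]

theorem pickVal_append_of_ne (l : List (String × String)) (k v : String) (h : String)
    (hne : ¬(k = h)) : pickVal (l ++ [(k, v)]) h = pickVal l h := by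
  unfold pickVal
  rw [get?_mk_append_singleton]
  cases hg : (PySem.Dict.mk l).get? h with
  | some w => simp
  | none => simp [hne]

theorem pickVal_append_self (l : List (String × String)) (k v : String)
    (hnm : k ∉ l.map Prod.fst) :
    pickVal (l ++ [(k, v)]) k =
      (if v ≠ "" then
        match PySem.Int.ofStr? v with
        | some n => some n
        | none => none
      else none) := by
  unfold pickVal
  rw [get?_mk_append_singleton, get?_mk_none_of_not_mem l k hnm]
  simp

-- the slot table built by B's pass equals A's per-name extraction, in canonical order
theorem slots_eq (rh : List (String × String)) (hnd : (rh.map Prod.fst).Nodup) :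
    rh.foldl stepB [none, none, none, none, none, none] = quotaHeadersA.map (pickVal rh) := by
  induction rh using List.reverseRecOn with
  | nil => rfl
  | append_singleton l kv ih =>
      obtain ⟨k1, v2⟩ := kv
      rw [List.map_append] at hnd
      have hnd' : (l.map Prod.fst).Nodup := (List.nodup_append.mp hnd).1
      have hnm : k1 ∉ l.map Prod.fst := by
        intro hmem
        have hdis := (List.nodup_append.mp hnd).2.2
        have := hdis k1 hmem
        simp at this
      rw [List.foldl_append, List.foldl_cons, List.foldl_nil, ih hnd']
      simp only [quotaHeadersA, List.map_cons, List.map_nil]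
      by_cases h0 : k1 = "Minute-Quota-Limit"
      · subst h0
        rw [pickVal_append_self l _ v2 hnm]
        rw [pickVal_append_of_ne l _ v2 _ (by decide), pickVal_append_of_ne l _ v2 _ (by decide),
            pickVal_append_of_ne l _ v2 _ (by decide), pickVal_append_of_ne l _ v2 _ (by decide),
            pickVal_append_of_ne l _ v2 _ (by decide)]
        unfold stepB
        rw [show orderTable.get? ("Minute-Quota-Limit", v2).1 = some 0 from rfl]
        by_cases hv : v2 = ""
        · simp [hv, pickVal_none_of_not_mem l _ hnm]
        · cases hp : PySem.Int.ofStr? v2 <;>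
            simp [hv, hp, List.set, pickVal_none_of_not_mem l _ hnm]
      by_cases h1 : k1 = "Minute-Quota-Remaining"
      · subst h1
        rw [pickVal_append_self l _ v2 hnm]
        rw [pickVal_append_of_ne l _ v2 _ (by decide), pickVal_append_of_ne l _ v2 _ (by decide),
            pickVal_append_of_ne l _ v2 _ (by decide), pickVal_append_of_ne l _ v2 _ (by decide),
            pickVal_append_of_ne l _ v2 _ (by decide)]
        unfold stepB
        rw [show orderTable.get? ("Minute-Quota-Remaining", v2).1 = some 1 from rfl]
        by_cases hv : v2 = ""
        · simp [hv, pickVal_none_of_not_mem l _ hnm]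
        · cases hp : PySem.Int.ofStr? v2 <;>
            simp [hv, hp, List.set, pickVal_none_of_not_mem l _ hnm]
      by_cases h2 : k1 = "Hour-Quota-Limit"
      · subst h2
        rw [pickVal_append_self l _ v2 hnm]
        rw [pickVal_append_of_ne l _ v2 _ (by decide), pickVal_append_of_ne l _ v2 _ (by decide),
            pickVal_append_of_ne l _ v2 _ (by decide), pickVal_append_of_ne l _ v2 _ (by decide),
            pickVal_append_of_ne l _ v2 _ (by decide)]
        unfold stepB
        rw [show orderTable.get? ("Hour-Quota-Limit", v2).1 = some 2 from rfl]
        by_cases hv : v2 = ""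
        · simp [hv, pickVal_none_of_not_mem l _ hnm]
        · cases hp : PySem.Int.ofStr? v2 <;>
            simp [hv, hp, List.set, pickVal_none_of_not_mem l _ hnm]
      by_cases h3 : k1 = "Hour-Quota-Remaining"
      · subst h3
        rw [pickVal_append_self l _ v2 hnm]
        rw [pickVal_append_of_ne l _ v2 _ (by decide), pickVal_append_of_ne l _ v2 _ (by decide),
            pickVal_append_of_ne l _ v2 _ (by decide), pickVal_append_of_ne l _ v2 _ (by decide),
            pickVal_append_of_ne l _ v2 _ (by decide)]
        unfold stepB
        rw [show orderTable.get? ("Hour-Quota-Remaining", v2).1 = some 3 from rfl]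
        by_cases hv : v2 = ""
        · simp [hv, pickVal_none_of_not_mem l _ hnm]
        · cases hp : PySem.Int.ofStr? v2 <;>
            simp [hv, hp, List.set, pickVal_none_of_not_mem l _ hnm]
      by_cases h4 : k1 = "Daily-Quota-Limit"
      · subst h4
        rw [pickVal_append_self l _ v2 hnm]
        rw [pickVal_append_of_ne l _ v2 _ (by decide), pickVal_append_of_ne l _ v2 _ (by decide),
            pickVal_append_of_ne l _ v2 _ (by decide), pickVal_append_of_ne l _ v2 _ (by decide),
            pickVal_append_of_ne l _ v2 _ (by decide)]
        unfold stepB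
        rw [show orderTable.get? ("Daily-Quota-Limit", v2).1 = some 4 from rfl]
        by_cases hv : v2 = ""
        · simp [hv, pickVal_none_of_not_mem l _ hnm]
        · cases hp : PySem.Int.ofStr? v2 <;>
            simp [hv, hp, List.set, pickVal_none_of_not_mem l _ hnm]
      by_cases h5 : k1 = "Daily-Quota-Remaining"
      · subst h5
        rw [pickVal_append_self l _ v2 hnm]
        rw [pickVal_append_of_ne l _ v2 _ (by decide), pickVal_append_of_ne l _ v2 _ (by decide),
            pickVal_append_of_ne l _ v2 _ (by decide), pickVal_append_of_ne l _ v2 _ (by decide),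
            pickVal_append_of_ne l _ v2 _ (by decide)]
        unfold stepB
        rw [show orderTable.get? ("Daily-Quota-Remaining", v2).1 = some 5 from rfl]
        by_cases hv : v2 = ""
        · simp [hv, pickVal_none_of_not_mem l _ hnm]
        · cases hp : PySem.Int.ofStr? v2 <;>
            simp [hv, hp, List.set, pickVal_none_of_not_mem l _ hnm]
      -- k1 is none of the six quota names: stepB is the identity and every pickVal is unchanged
      · have horder : orderTable.get? k1 = none := by
          have e0 : (("Minute-Quota-Limit" : String) == k1) = false := by
            simp only [beq_eq_false_iff_ne]; exact fun h => h0 h.symm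
          have e1 : (("Minute-Quota-Remaining" : String) == k1) = false := by
            simp only [beq_eq_false_iff_ne]; exact fun h => h1 h.symm
          have e2 : (("Hour-Quota-Limit" : String) == k1) = false := by
            simp only [beq_eq_false_iff_ne]; exact fun h => h2 h.symm
          have e3 : (("Hour-Quota-Remaining" : String) == k1) = false := by
            simp only [beq_eq_false_iff_ne]; exact fun h => h3 h.symm
          have e4 : (("Daily-Quota-Limit" : String) == k1) = false := by
            simp only [beq_eq_false_iff_ne]; exact fun h => h4 h.symm
          have e5 : (("Daily-Quota-Remaining" : String) == k1) = false := by
            simp only [beq_eq_false_iff_ne]; exact fun h => h5 h.symm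
          simp only [orderTable, PySem.Dict.get?_mk_cons, e0, e1, e2, e3, e4, e5,
            Bool.false_eq_true, if_false]
          simp [PySem.Dict.get?]
        unfold stepB
        rw [show ((k1, v2) : String × String).1 = k1 from rfl, horder]
        rw [pickVal_append_of_ne l _ v2 _ h0, pickVal_append_of_ne l _ v2 _ h1,
            pickVal_append_of_ne l _ v2 _ h2, pickVal_append_of_ne l _ v2 _ h3,
            pickVal_append_of_ne l _ v2 _ h4, pickVal_append_of_ne l _ v2 _ h5]

theorem stepA_eq (rh : List (String × String)) (q : PySem.Dict String Int) (h : String) :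
    stepA rh q h =
      match pickVal rh h with
      | some n => q.insert (PySem.Str.replace (PySem.Str.lower h) "-" "_") n
      | none => q := by
  unfold stepA pickVal
  cases hg : (PySem.Dict.mk rh).get? h with
  | none => rfl
  | some v =>
      by_cases hv : v = ""
      · simp [hv]
      · cases hp : PySem.Int.ofStr? v <;> simp [hv, hp]

-- ===== VERDICT (by name: the statement is the Claim_ definition above) =====
theorem get_quota_info_spec : Claim_equal_get_quota_info := by
  intro rh _hdom hpre
  unfold Spec_get_quota_info get_quota_info get_quota_info_alt
  rw [slots_eq rh hpre.1]
  simp only [quotaHeadersA, namesB, List.map_cons, List.map_nil, List.zip, List.zipWith,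
    List.foldl_cons, List.foldl_nil, stepA_eq, emitB]
  rw [show PySem.Str.replace (PySem.Str.lower "Minute-Quota-Limit") "-" "_" = "minute_quota_limit" from by decide,
      show PySem.Str.replace (PySem.Str.lower "Minute-Quota-Remaining") "-" "_" = "minute_quota_remaining" from by decide,
      show PySem.Str.replace (PySem.Str.lower "Hour-Quota-Limit") "-" "_" = "hour_quota_limit" from by decide,
      show PySem.Str.replace (PySem.Str.lower "Hour-Quota-Remaining") "-" "_" = "hour_quota_remaining" from by decide,
      show PySem.Str.replace (PySem.Str.lower "Daily-Quota-Limit") "-" "_" = "daily_quota_limit" from by decide,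
      show PySem.Str.replace (PySem.Str.lower "Daily-Quota-Remaining") "-" "_" = "daily_quota_remaining" from by decide]
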